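-- pv_equiv track=rewrite | github.com/saranya-veera-durai/learning | pyspark_code_generation-2.py | replace_dots
-- ===== SOURCE A (Python) =====
-- def replace_dots(struct_columns):
--     result = []
--     for s in struct_columns:
--         parts = s.rsplit('.', 1)
--         if len(parts) > 1:
--             replaced = parts[0].replace('.', '_') + '.' + parts[1]
--         else:
--             replaced = parts[0]
--         result.append(replaced)
--     return result
-- ===== SOURCE B (Python) =====
-- def replace_dots(struct_columns):
--     result = []
--     for s in struct_columns:
--         out = []
--         seen = False
--         for c in reversed(s):
--             if c == '.':
--                 out.append('.' if not seen else '_')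
--                 seen = True
--             else:
--                 out.append(c)
--         out.reverse()
--         result.append(''.join(out))
--     return result
-- ===== Notes on version B (the rewrite author's own statement) =====
-- stated objective: alternative
-- what changed: B replaces A's rsplit('.',1)+replace with a single right-to-left character scan per string: a boolean 'seen' state machine keeps the first dot met from the right and turns every later dot into '_', with no splitting or substring replacement at all.
import Mathlib
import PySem

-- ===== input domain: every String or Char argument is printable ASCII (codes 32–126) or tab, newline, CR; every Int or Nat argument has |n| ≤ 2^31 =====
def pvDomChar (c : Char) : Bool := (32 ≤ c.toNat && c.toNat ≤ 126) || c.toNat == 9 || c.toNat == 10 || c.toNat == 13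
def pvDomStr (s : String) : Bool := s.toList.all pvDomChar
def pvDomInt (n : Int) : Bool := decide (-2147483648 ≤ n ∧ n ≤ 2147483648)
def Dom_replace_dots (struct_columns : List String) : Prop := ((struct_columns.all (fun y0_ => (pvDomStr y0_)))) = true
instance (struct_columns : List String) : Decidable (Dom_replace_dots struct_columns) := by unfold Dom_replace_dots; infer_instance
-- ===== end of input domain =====

-- B does one right-to-left scan per string with a 'seen dot' flag (first dot from the right kept,
-- later ones become '_') instead of A's rsplit-once + character replace (objective: alternative).


-- ===== PORT A =====
-- hand port of s.rsplit('.', 1) (PySem has no rsplit); exact for a 1-char separator: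
-- split at the LAST '.' (found by scanning the reversed characters), else the whole string.
def pvRsplitDot1 (cs : List Char) : List (List Char) :=
  match cs.reverse.span (· ≠ '.') with
  | (_, []) => [cs]
  | (u, _ :: a) => [a.reverse, u.reverse]

-- loop body of A: rsplit('.',1); if two parts, replace '.'→'_' in the head and glue back with '.'
def pvBodyA (cs : List Char) : List Char :=
  let parts := pvRsplitDot1 cs
  if parts.length > 1 then
    PySem.Chars.replace parts.headI ['.'] ['_'] ++ '.' :: parts.getLast!
  else parts.headI

def replace_dots (struct_columns : List String) : List String :=
  struct_columns.foldl (fun result s => result ++ [String.ofList (pvBodyA s.toList)]) []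

-- ===== PORT B =====
-- inner loop of B: fold over the REVERSED characters threading (out, seen);
-- a dot appends '.' when seen is false and '_' afterwards, setting seen
def pvStepB (st : List Char × Bool) (c : Char) : List Char × Bool :=
  if c = '.' then (st.1 ++ [if !st.2 then '.' else '_'], true) else (st.1 ++ [c], st.2)

-- body of B: run the scan over reversed(s), then out.reverse
def pvBodyB (cs : List Char) : List Char :=
  (cs.reverse.foldl pvStepB ([], false)).1.reverse

def replace_dots_alt (struct_columns : List String) : List String :=
  struct_columns.foldl (fun result s => result ++ [String.ofList (pvBodyB s.toList)]) []

-- ===== PRECONDITION & SPEC =====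
def Spec_replace_dots (struct_columns : List String) (out : List String) : Prop := out = replace_dots_alt struct_columns
instance (struct_columns : List String) (out : List String) : Decidable (Spec_replace_dots struct_columns out) := by unfold Spec_replace_dots; infer_instance

-- ===== CLAIM (what is proved, stated in full; the proofs are below) =====
def Claim_equal_replace_dots : Prop := ∀ (struct_columns : List String), Dom_replace_dots struct_columns → Spec_replace_dots struct_columns (replace_dots struct_columns)

-- ===== LEMMAS AND PROOFS =====

-- the per-char substitution performed by parts[0].replace('.', '_')
def pvSub (c : Char) : Char := if c = '.' then '_' else c

-- functional form of B's inner scan (chars already reversed, flag threaded)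
def pvScan : List Char → Bool → List Char
  | [], _ => []
  | c :: t, seen =>
    if c = '.' then (if !seen then '.' else '_') :: pvScan t true
    else c :: pvScan t seen

theorem foldl_stepB (r : List Char) (acc : List Char) (seen : Bool) :
    (r.foldl pvStepB (acc, seen)).1 = acc ++ pvScan r seen := by
  induction r generalizing acc seen with
  | nil => simp [pvScan]
  | cons c t ih =>
    by_cases h : c = '.'
    · simp [pvStepB, pvScan, h, ih]
    · simp [pvStepB, pvScan, h, ih]

theorem pvScan_no_dot {r : List Char} (h : '.' ∉ r) (seen : Bool) : pvScan r seen = r := by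
  induction r generalizing seen with
  | nil => rfl
  | cons c t ih =>
    simp only [List.mem_cons, not_or] at h
    simp [pvScan, Ne.symm h.1, ih h.2]

theorem pvScan_true (r : List Char) : pvScan r true = r.map pvSub := by
  induction r with
  | nil => rfl
  | cons c t ih =>
    by_cases h : c = '.' <;> simp [pvScan, pvSub, h, ih]

theorem pvScan_split {u : List Char} (h : '.' ∉ u) (a : List Char) :
    pvScan (u ++ '.' :: a) false = u ++ '.' :: a.map pvSub := by
  induction u with
  | nil => simp [pvScan, pvScan_true]
  | cons c t ih =>
    simp only [List.mem_cons, not_or] at h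
    simp [pvScan, Ne.symm h.1, ih h.2]

theorem replace_go_map (fuel : ℕ) (l acc : List Char) (h : l.length ≤ fuel) :
    PySem.Chars.replace.go ['.'] ['_'] fuel l acc = acc.reverse ++ l.map pvSub := by
  induction fuel generalizing l acc with
  | zero =>
    have : l = [] := List.eq_nil_of_length_eq_zero (Nat.le_zero.mp h)
    subst this; simp [PySem.Chars.replace.go]
  | succ n ih =>
    cases l with
    | nil => simp [PySem.Chars.replace.go]
    | cons c t =>
      simp only [PySem.Chars.replace.go]
      by_cases hc : c = '.'
      · rw [if_pos (by simp [hc, List.isPrefixOf])]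
        have ht : t.length ≤ n := by simp only [List.length_cons] at h; omega
        simp only [List.length_cons, List.length_nil, List.drop_succ_cons, List.drop_zero]
        rw [ih _ _ ht]
        simp [pvSub, hc]
      · rw [if_neg (by simp [List.isPrefixOf]; intro hh; exact hc hh.symm)]
        simp only [List.length_cons] at h
        rw [ih _ _ (by omega)]
        simp [pvSub, hc]

theorem replace_dot_map (l : List Char) :
    PySem.Chars.replace l ['.'] ['_'] = l.map pvSub := by
  simp [PySem.Chars.replace, replace_go_map l.length l [] le_rfl]

theorem body_eq (cs : List Char) : pvBodyA cs = pvBodyB cs := by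
  unfold pvBodyB
  rw [foldl_stepB, List.nil_append]
  rcases hv : cs.reverse.dropWhile (· ≠ '.') with _ | ⟨d, a⟩
  · -- no dot in cs
    have hnodot : '.' ∉ cs := by
      intro hmem
      have : '.' ∈ cs.reverse.takeWhile (· ≠ '.') := by
        have := List.takeWhile_append_dropWhile (p := (· ≠ '.')) (l := cs.reverse)
        rw [hv, List.append_nil] at this
        rw [this]; exact List.mem_reverse.mpr hmem
      have := List.mem_takeWhile_imp this
      simp at this
    have hnodotr : '.' ∉ cs.reverse := fun h => hnodot (List.mem_reverse.mp h)
    simp only [pvBodyA, pvRsplitDot1, List.span_eq_takeWhile_dropWhile, hv,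
      pvScan_no_dot hnodotr, List.reverse_reverse]
    rfl
  · -- cs.reverse = u ++ '.' :: a with no dot in u
    set u := cs.reverse.takeWhile (· ≠ '.') with hu
    have hd : d = '.' := by
      have := List.head_dropWhile_not (p := (· ≠ '.')) (l := cs.reverse)
      rw [hv] at this; simpa using this (by simp)
    have hrev : cs.reverse = u ++ '.' :: a := by
      have := List.takeWhile_append_dropWhile (p := (· ≠ '.')) (l := cs.reverse)
      rw [hv, hd] at this; exact this.symm
    have hnodotu : '.' ∉ u := fun hmem => by
      have := List.mem_takeWhile_imp (l := cs.reverse) (p := (· ≠ '.')) (hu ▸ hmem)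
      simp at this
    simp only [pvBodyA, pvRsplitDot1, List.span_eq_takeWhile_dropWhile, hv, ← hu]
    simp only [List.length_cons, List.length_nil, gt_iff_lt, Nat.lt_add_one_iff,
      List.headI, List.getLast!]
    rw [if_pos (by omega), hrev, pvScan_split hnodotu, replace_dot_map]
    simp

-- ===== VERDICT (by name: the statement is the Claim_ definition above) =====
theorem replace_dots_spec : Claim_equal_replace_dots := by
  intro sc _
  unfold Spec_replace_dots replace_dots replace_dots_alt
  rw [PySem.List.foldl_append_singleton_eq_map, PySem.List.foldl_append_singleton_eq_map]
  exact List.map_congr_left (fun s _ => by rw [body_eq])
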